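-- pv_equiv track=rewrite | github.com/7marcosfelipe-gif/Kanvas | organize-canvas.py | level_row_spans
-- ===== SOURCE A (Python) =====
-- def level_row_spans(rows):
--     spans = []
--     start = 0
--     while start < len(rows):
--         level = rows[start]["level"]
--         end = start + 1
--         while end < len(rows) and rows[end]["level"] == level:
--             end += 1
--         spans.append((level, start, end))
--         start = end
--     return spans
-- ===== SOURCE B (Python) =====
-- def level_row_spans(rows):
--     if not rows:
--         return []
--     spans = []
--     run_start = 0
--     cur = rows[0]["level"]
--     i = 1
--     for row in rows[1:]:
--         lv = row["level"]
--         if lv != cur: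
--             spans.append((cur, run_start, i))
--             cur, run_start = lv, i
--         i += 1
--     spans.append((cur, run_start, len(rows)))
--     return spans
-- ===== Notes on version B (the rewrite author's own statement) =====
-- stated objective: simpler
-- what changed: Replaced A's nested while-loops (an inner scan to find each run's end, restarting the outer loop there) with a single flat pass over the rows that tracks the current run's level and start index and flushes a span whenever the level changes (plus a final flush).
import Mathlib
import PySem

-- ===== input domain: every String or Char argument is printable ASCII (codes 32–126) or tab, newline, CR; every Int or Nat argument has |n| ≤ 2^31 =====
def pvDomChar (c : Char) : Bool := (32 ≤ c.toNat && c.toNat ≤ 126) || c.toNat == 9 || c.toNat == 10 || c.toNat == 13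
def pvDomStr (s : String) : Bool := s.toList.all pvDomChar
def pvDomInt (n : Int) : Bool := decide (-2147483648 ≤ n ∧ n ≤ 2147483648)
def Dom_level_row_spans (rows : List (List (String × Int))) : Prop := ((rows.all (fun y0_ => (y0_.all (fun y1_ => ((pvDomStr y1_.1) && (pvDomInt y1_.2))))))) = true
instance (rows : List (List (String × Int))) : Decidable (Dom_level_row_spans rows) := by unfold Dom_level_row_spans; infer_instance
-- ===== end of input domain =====

-- B replaces A's nested while-loops (inner scan per run) with one flat pass that
-- tracks the current run's level and start index; objective: simpler single-pass decomposition.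


-- ===== PORT A =====
-- row["level"]: first-match lookup in the association list; the `.getD 0` default is
-- never reached on inputs satisfying Pre_ (every row has a "level" key).
def pvLevel (row : List (String × Int)) : Int :=
  ((row.find? (fun p => p.1 == "level")).map (·.2)).getD 0

-- inner `while end < len(rows) and rows[end]["level"] == level: end += 1`
-- (structural recursion on a fuel counter ≥ rows.length - e, which bounds the loop's
-- remaining iterations; rows[e] via List.getD: exact because the guard ensures e < rows.length)
def pvInnerA (rows : List (List (String × Int))) (level : Int) : Nat → Nat → Nat
  | 0, e => e
  | fuel + 1, e =>
    if e < rows.length ∧ pvLevel (rows.getD e []) = level then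
      pvInnerA rows level fuel (e + 1)
    else e

-- outer `while start < len(rows): … spans.append((level, start, end)); start = end`
-- (fuel ≥ rows.length - start bounds the remaining iterations, since end > start each time)
def pvOuterA (rows : List (List (String × Int))) : Nat → Nat → List (Int × Int × Int)
  | 0, _ => []
  | fuel + 1, start =>
    if start < rows.length then
      let level := pvLevel (rows.getD start [])
      let e := pvInnerA rows level rows.length (start + 1)
      (level, (start : Int), (e : Int)) :: pvOuterA rows fuel e
    else []

def level_row_spans (rows : List (List (String × Int))) : List (Int × Int × Int) :=
  pvOuterA rows rows.length 0

-- ===== PORT B =====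
-- one step of B's flat pass: state = (spans, cur, run_start, i)
def pvStepB (st : List (Int × Int × Int) × Int × Nat × Nat) (row : List (String × Int)) :
    List (Int × Int × Int) × Int × Nat × Nat :=
  let (spans, cur, runStart, i) := st
  let lv := pvLevel row
  if lv ≠ cur then (spans ++ [(cur, (runStart : Int), (i : Int))], lv, i, i + 1)
  else (spans, cur, runStart, i + 1)

def level_row_spans_alt (rows : List (List (String × Int))) : List (Int × Int × Int) :=
  match rows with
  | [] => []
  | r0 :: rest =>
    let st := rest.foldl pvStepB ([], pvLevel r0, 0, 1)
    st.1 ++ [(st.2.1, (st.2.2.1 : Int), ((rest.length + 1 : Nat) : Int))]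

-- ===== PRECONDITION & SPEC =====
-- Pre_ excludes rows missing a "level" key: there Python A (and B) raise KeyError.
def Pre_level_row_spans (rows : List (List (String × Int))) : Prop :=
  (rows.all (fun r => r.any (fun p => p.1 == "level"))) = true
instance (rows : List (List (String × Int))) : Decidable (Pre_level_row_spans rows) := by
  unfold Pre_level_row_spans; infer_instance

def pvWitness_level_row_spans : (List (List (String × Int))) :=
  [[("level", 1)], [("level", 1)], [("level", 2)]]

def Spec_level_row_spans (rows : List (List (String × Int))) (out : List (Int × Int × Int)) : Prop := out = level_row_spans_alt rows
instance (rows : List (List (String × Int))) (out : List (Int × Int × Int)) : Decidable (Spec_level_row_spans rows out) := by unfold Spec_level_row_spans; infer_instance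

-- ===== CLAIM (what is proved, stated in full; the proofs are below) =====
def Claim_equal_level_row_spans : Prop := ∀ (rows : List (List (String × Int))), Dom_level_row_spans rows → Pre_level_row_spans rows → Spec_level_row_spans rows (level_row_spans rows)

-- ===== LEMMAS AND PROOFS =====

-- reference: the span list of a list of levels, with a starting offset
def runsSpec : List Int → Nat → List (Int × Int × Int)
  | [], _ => []
  | l :: ls, s =>
    let t := (ls.takeWhile (· == l)).length
    (l, (s : Int), ((s + 1 + t : Nat) : Int)) :: runsSpec (ls.dropWhile (· == l)) (s + 1 + t)
termination_by ls _ => ls.length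
decreasing_by simp; exact List.length_dropWhile_le _ _

-- A's inner while computes e + length of the run of `level` in the levels from e on
theorem pvInnerA_eq (rows : List (List (String × Int))) (level : Int) :
    ∀ (fuel e : Nat), rows.length - e ≤ fuel →
      pvInnerA rows level fuel e
        = e + (((rows.map pvLevel).drop e).takeWhile (· == level)).length := by
  intro fuel
  induction fuel with
  | zero =>
    intro e hle
    rw [pvInnerA, List.drop_eq_nil_of_le (by simpa using Nat.le_of_sub_eq_zero (by omega))]
    simp
  | succ fuel ih =>
    intro e hle
    by_cases h : e < rows.length ∧ pvLevel (rows.getD e []) = level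
    · obtain ⟨hlt, heq⟩ := h
      rw [pvInnerA, if_pos ⟨hlt, heq⟩, ih (e + 1) (by omega)]
      rw [List.getD_eq_getElem _ _ hlt] at heq
      rw [List.drop_eq_getElem_cons (l := rows.map pvLevel) (i := e) (by simpa using hlt)]
      simp [heq]
      omega
    · rw [pvInnerA, if_neg h]
      by_cases hlt : e < rows.length
      · have heq : ¬ pvLevel (rows.getD e []) = level := fun hc => h ⟨hlt, hc⟩
        rw [List.getD_eq_getElem _ _ hlt] at heq
        rw [List.drop_eq_getElem_cons (l := rows.map pvLevel) (i := e) (by simpa using hlt)]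
        simp [heq]
      · rw [List.drop_eq_nil_of_le (by simpa using Nat.le_of_not_lt hlt)]
        simp

theorem dropWhile_eq_drop (p : Int → Bool) (l : List Int) :
    l.dropWhile p = l.drop (l.takeWhile p).length := by
  calc l.dropWhile p
      = (l.takeWhile p ++ l.dropWhile p).drop (l.takeWhile p).length := List.drop_left.symm
    _ = l.drop (l.takeWhile p).length := by rw [List.takeWhile_append_dropWhile]

-- A's outer loop equals runsSpec on the dropped level list
theorem pvOuterA_eq (rows : List (List (String × Int))) :
    ∀ (fuel start : Nat), rows.length - start ≤ fuel →
      pvOuterA rows fuel start = runsSpec ((rows.map pvLevel).drop start) start := by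
  intro fuel
  induction fuel with
  | zero =>
    intro start hle
    rw [pvOuterA, List.drop_eq_nil_of_le (by simpa using Nat.le_of_sub_eq_zero (by omega))]
    simp [runsSpec]
  | succ fuel ih =>
    intro start hle
    by_cases h : start < rows.length
    · rw [pvOuterA, if_pos h]
      simp only [List.getD, List.getElem?_eq_getElem h, Option.getD_some]
      have hmlt : start < (rows.map pvLevel).length := by simpa using h
      rw [List.drop_eq_getElem_cons (l := rows.map pvLevel) (i := start) hmlt]
      rw [runsSpec]
      have hget : (rows.map pvLevel)[start]'hmlt = pvLevel rows[start] := by simp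
      have hinner := pvInnerA_eq rows (pvLevel rows[start]) rows.length (start + 1) (by omega)
      rw [hget, hinner]
      set t := ((rows.map pvLevel).drop (start + 1)).takeWhile (· == pvLevel rows[start]) with ht
      have hdw : ((rows.map pvLevel).drop (start + 1)).dropWhile (· == pvLevel rows[start])
          = (rows.map pvLevel).drop (start + 1 + t.length) := by
        rw [dropWhile_eq_drop, ← ht, List.drop_drop]
      rw [hdw, ih (start + 1 + t.length) (by omega)]
    · rw [pvOuterA, if_neg h, List.drop_eq_nil_of_le (by simpa using Nat.le_of_not_lt h)]
      simp [runsSpec]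

-- B's fold step, on the level only (pvStepB after pulling pvLevel through the map)
def pvStepB' (st : List (Int × Int × Int) × Int × Nat × Nat) (lv : Int) :
    List (Int × Int × Int) × Int × Nat × Nat :=
  let (spans, cur, runStart, i) := st
  if lv ≠ cur then (spans ++ [(cur, (runStart : Int), (i : Int))], lv, i, i + 1)
  else (spans, cur, runStart, i + 1)

theorem pvStepB_map (st : List (Int × Int × Int) × Int × Nat × Nat)
    (row : List (String × Int)) : pvStepB st row = pvStepB' st (pvLevel row) := by
  obtain ⟨spans, cur, rs, i⟩ := st; rfl

-- B's fold, finished with the final flush, equals runsSpec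
theorem pvFoldB_eq (ls : List Int) :
    ∀ (cur : Int) (s i : Nat) (spans : List (Int × Int × Int)),
      (ls.foldl pvStepB' (spans, cur, s, i)).1
          ++ [((ls.foldl pvStepB' (spans, cur, s, i)).2.1,
               ((ls.foldl pvStepB' (spans, cur, s, i)).2.2.1 : Int),
               ((i + ls.length : Nat) : Int))]
      = spans ++ (cur, (s : Int), ((i + (ls.takeWhile (· == cur)).length : Nat) : Int))
          :: runsSpec (ls.dropWhile (· == cur)) (i + (ls.takeWhile (· == cur)).length) := by
  induction ls with
  | nil => intro cur s i spans; simp [runsSpec]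
  | cons l ls ih =>
    intro cur s i spans
    by_cases hl : l = cur
    · subst hl
      have hstep : pvStepB' (spans, l, s, i) l = (spans, l, s, i + 1) := by
        simp [pvStepB']
      rw [List.foldl_cons, hstep,
        List.takeWhile_cons_of_pos (by simp), List.dropWhile_cons_of_pos (by simp)]
      rw [List.length_cons, show i + (ls.length + 1) = i + 1 + ls.length from by omega,
        ih l s (i + 1) spans, List.length_cons,
        show i + ((ls.takeWhile (· == l)).length + 1)
            = i + 1 + (ls.takeWhile (· == l)).length from by omega]
    · have hstep : pvStepB' (spans, cur, s, i) l
          = (spans ++ [(cur, (s : Int), (i : Int))], l, i, i + 1) := by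
        simp [pvStepB', hl]
      rw [List.foldl_cons, hstep,
        List.takeWhile_cons_of_neg (by simp [hl]), List.dropWhile_cons_of_neg (by simp [hl])]
      rw [List.length_cons, show i + (ls.length + 1) = i + 1 + ls.length from by omega,
        ih l i (i + 1) (spans ++ [(cur, (s : Int), (i : Int))]), runsSpec]
      simp

theorem alt_eq_runsSpec (rows : List (List (String × Int))) :
    level_row_spans_alt rows = runsSpec (rows.map pvLevel) 0 := by
  cases rows with
  | nil => simp [level_row_spans_alt, runsSpec]
  | cons r0 rest =>
    have hfold : rest.foldl pvStepB ([], pvLevel r0, 0, 1)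
        = (rest.map pvLevel).foldl pvStepB' ([], pvLevel r0, 0, 1) := by
      rw [List.foldl_map]
      exact List.foldl_ext _ _ _ fun st row _ => pvStepB_map st row
    have h2 := pvFoldB_eq (rest.map pvLevel) (pvLevel r0) 0 1 []
    simp only [List.length_map] at h2
    show (rest.foldl pvStepB ([], pvLevel r0, 0, 1)).1
        ++ [((rest.foldl pvStepB ([], pvLevel r0, 0, 1)).2.1,
             ((rest.foldl pvStepB ([], pvLevel r0, 0, 1)).2.2.1 : Int),
             ((rest.length + 1 : Nat) : Int))]
      = runsSpec ((r0 :: rest).map pvLevel) 0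
    rw [hfold, show rest.length + 1 = 1 + rest.length from by omega, h2,
      List.map_cons, runsSpec]
    simp

-- ===== VERDICT (by name: the statement is the Claim_ definition above) =====
theorem level_row_spans_spec : Claim_equal_level_row_spans := by
  intro rows _ _
  unfold Spec_level_row_spans level_row_spans
  rw [pvOuterA_eq rows rows.length 0 (by omega), alt_eq_runsSpec]
  simp
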